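-- pv_equiv track=rewrite | github.com/eugnmueller-87/IRONHACK | WEEK 3/PROJECT/miro/boards.py | _note_positions
-- ===== SOURCE A (Python) =====
-- FRAME_W = 960
--
-- FRAME_H = 720
--
-- NOTE_W = 210
--
-- NOTE_H = 210
--
-- NOTE_GAP = 220
--
-- NOTES_PER_ROW = 4
--
-- def _note_positions(frame_x: int, frame_y: int, count: int):
--     positions = []
--     start_x = frame_x - (FRAME_W // 2) + NOTE_W // 2 + 30
--     start_y = frame_y - (FRAME_H // 2) + NOTE_H // 2 + 80  # leave room for frame title
--     for i in range(count):
--         col = i % NOTES_PER_ROW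
--         row = i // NOTES_PER_ROW
--         positions.append((start_x + col * NOTE_GAP, start_y + row * NOTE_GAP))
--     return positions
-- ===== SOURCE B (Python) =====
-- FRAME_W = 960
--
-- FRAME_H = 720
--
-- NOTE_W = 210
--
-- NOTE_H = 210
--
-- NOTE_GAP = 220
--
-- NOTES_PER_ROW = 4
--
-- def _note_positions(frame_x: int, frame_y: int, count: int):
--     # Build the two coordinate streams separately (x by tiling one row template,
--     # y by repeating each row's y NOTES_PER_ROW times), zip them and truncate.
--     start_x = frame_x - (FRAME_W // 2) + NOTE_W // 2 + 30
--     start_y = frame_y - (FRAME_H // 2) + NOTE_H // 2 + 80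
--     nrows = (count + NOTES_PER_ROW - 1) // NOTES_PER_ROW
--     xs = [start_x + c * NOTE_GAP for c in range(NOTES_PER_ROW)] * nrows
--     ys = [start_y + r * NOTE_GAP for r in range(nrows) for _ in range(NOTES_PER_ROW)]
--     return list(zip(xs, ys))[:count]
-- ===== Notes on version B (the rewrite author's own statement) =====
-- stated objective: alternative
-- what changed: Instead of one loop computing each tuple from its flat index by div/mod, B builds the x-coordinate stream by tiling a one-row template list, the y-coordinate stream by repeating each row's y four times, zips the two streams and truncates to count.
import Mathlib
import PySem

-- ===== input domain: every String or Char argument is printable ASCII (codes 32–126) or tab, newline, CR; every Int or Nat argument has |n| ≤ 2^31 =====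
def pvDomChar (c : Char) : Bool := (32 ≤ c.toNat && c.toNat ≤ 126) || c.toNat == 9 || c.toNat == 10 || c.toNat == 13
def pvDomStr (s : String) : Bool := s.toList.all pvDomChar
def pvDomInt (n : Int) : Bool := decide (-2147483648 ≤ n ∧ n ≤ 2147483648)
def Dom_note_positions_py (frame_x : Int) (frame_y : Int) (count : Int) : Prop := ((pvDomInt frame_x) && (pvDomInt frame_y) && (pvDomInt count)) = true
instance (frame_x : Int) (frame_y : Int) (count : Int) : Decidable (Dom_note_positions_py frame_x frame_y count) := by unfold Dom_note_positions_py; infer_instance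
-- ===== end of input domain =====

-- B builds the x and y coordinate streams separately (tiling a row template / repeating
-- each row's y), zips them and truncates to count (objective: alternative decomposition).


-- ===== PORT A =====
def note_positions_py (frame_x : Int) (frame_y : Int) (count : Int) : List (Int × Int) :=
  let start_x := frame_x - PySem.Int.floordiv 960 2 + PySem.Int.floordiv 210 2 + 30
  let start_y := frame_y - PySem.Int.floordiv 720 2 + PySem.Int.floordiv 210 2 + 80
  (PySem.List.pyRange 0 count 1).foldl
    (fun positions i =>
      positions ++ [(start_x + PySem.Int.mod i 4 * 220, start_y + PySem.Int.floordiv i 4 * 220)])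
    []

-- ===== PORT B =====
def note_positions_py_alt (frame_x : Int) (frame_y : Int) (count : Int) : List (Int × Int) :=
  let start_x := frame_x - PySem.Int.floordiv 960 2 + PySem.Int.floordiv 210 2 + 30
  let start_y := frame_y - PySem.Int.floordiv 720 2 + PySem.Int.floordiv 210 2 + 80
  let nrows := PySem.Int.floordiv (count + 4 - 1) 4
  let xs := PySem.List.pyRepeat ((PySem.List.pyRange 0 4 1).map (fun c => start_x + c * 220)) nrows
  let ys := (PySem.List.pyRange 0 nrows 1).flatMap
    (fun r => (PySem.List.pyRange 0 4 1).map (fun _ => start_y + r * 220))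
  PySem.List.slice (xs.zip ys) none (some count)

-- ===== PRECONDITION & SPEC =====
def Spec_note_positions_py (frame_x : Int) (frame_y : Int) (count : Int) (out : List (Int × Int)) : Prop := out = note_positions_py_alt frame_x frame_y count
instance (frame_x : Int) (frame_y : Int) (count : Int) (out : List (Int × Int)) : Decidable (Spec_note_positions_py frame_x frame_y count out) := by unfold Spec_note_positions_py; infer_instance

-- ===== CLAIM =====
def Claim_equal_note_positions_py : Prop := ∀ (frame_x : Int) (frame_y : Int) (count : Int), Dom_note_positions_py frame_x frame_y count → Spec_note_positions_py frame_x frame_y count (note_positions_py frame_x frame_y count)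

-- ===== LEMMAS AND PROOFS =====

lemma pyRange04 : PySem.List.pyRange 0 4 1 = [0, 1, 2, 3] := by decide

-- B's tiled x-stream in closed form: element j is sx + (j % 4) * 220
lemma xs_eq (sx : Int) (n : Nat) :
    (List.replicate n ((PySem.List.pyRange 0 4 1).map (fun c => sx + c * 220))).flatten
      = (List.range (4 * n)).map (fun j => sx + ((j % 4 : Nat) : Int) * 220) := by
  induction n with
  | zero => simp
  | succ n ih =>
    rw [List.replicate_succ', List.flatten_append, ih]
    have h4 : 4 * (n + 1) = 4 * n + 4 := by ring
    rw [h4, List.range_add, List.map_append]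
    congr 1
    simp [pyRange04, List.range_succ]

-- B's y-stream in closed form: element j is sy + (j / 4) * 220
lemma ys_eq (sy : Int) (n : Nat) :
    ((List.range n).flatMap (fun (r : Nat) => (PySem.List.pyRange 0 4 1).map (fun _ => sy + (r : Int) * 220)))
      = (List.range (4 * n)).map (fun j => sy + ((j / 4 : Nat) : Int) * 220) := by
  induction n with
  | zero => simp
  | succ n ih =>
    rw [List.range_succ, List.flatMap_append, ih]
    have h4 : 4 * (n + 1) = 4 * n + 4 := by ring
    rw [h4, List.range_add, List.map_append]
    congr 1
    simp only [pyRange04, List.range_succ]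
    simp
    omega

-- A's flat loop in closed form
lemma noteA_eq (sx sy : Int) (count : Int) :
    (PySem.List.pyRange 0 count 1).foldl
      (fun positions i =>
        positions ++ [(sx + PySem.Int.mod i 4 * 220, sy + PySem.Int.floordiv i 4 * 220)]) []
    = (List.range count.toNat).map
        (fun j => (sx + ((j % 4 : Nat) : Int) * 220, sy + ((j / 4 : Nat) : Int) * 220)) := by
  rw [PySem.List.foldl_append_singleton_eq_map, PySem.List.pyRange_one, List.map_map]
  simp only [Int.sub_zero, List.nil_append]
  apply List.map_congr_left
  intro j _
  simp [Function.comp]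

-- ===== VERDICT =====
theorem note_positions_py_spec : Claim_equal_note_positions_py := by
  intro fx fy count _
  unfold Spec_note_positions_py note_positions_py note_positions_py_alt
  rw [noteA_eq]
  set sx := fx - PySem.Int.floordiv 960 2 + PySem.Int.floordiv 210 2 + 30 with hsx
  set sy := fy - PySem.Int.floordiv 720 2 + PySem.Int.floordiv 210 2 + 80 with hsy
  set q := PySem.Int.floordiv (count + 4 - 1) 4 with hq
  have hys : PySem.List.pyRange 0 q 1 = List.map (fun k : Nat => ((k : Int))) (List.range q.toNat) := by
    rw [PySem.List.pyRange_one]; norm_num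
  simp only [PySem.List.pyRepeat, hys, List.flatMap_map]
  rw [xs_eq, ys_eq, List.zip_map']
  by_cases hc : 0 ≤ count
  · -- count >= 0: the grid has 4*q >= count cells, slicing keeps the first count
    have hq1 : count ≤ 4 * q := by
      have := (PySem.Int.floordiv_lt_iff_lt_mul (a := count + 4 - 1) (b := 4) (q := q + 1) (by norm_num)).mp (by omega)
      omega
    have hq0 : 0 ≤ q := by
      have := (PySem.Int.le_floordiv_iff_mul_le (a := count + 4 - 1) (b := 4) (q := 0) (by norm_num)).mpr (by omega)
      omega
    rw [PySem.List.slice_to _ hc, List.map_take.symm, List.take_range]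
    have hmin : min count.toNat (4 * q.toNat) = count.toNat := by omega
    rw [hmin]
  · -- count < 0: q <= 0, both sides are the empty list
    have hq0 : q ≤ 0 := by
      have := (PySem.Int.floordiv_lt_iff_lt_mul (a := count + 4 - 1) (b := 4) (q := 1) (by norm_num)).mpr (by omega)
      omega
    have hqn : q.toNat = 0 := by omega
    have hcn : count.toNat = 0 := by omega
    rw [hqn, hcn]
    simp [PySem.List.slice]
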